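-- pv_equiv track=rewrite | github.com/hukkelas/full_body_anonymization | fba/utils/utils.py | iterate_resolutions
-- ===== SOURCE A (Python) =====
-- def iterate_resolutions(start_res, end_res, mul=2, reverse=False):
--     if reverse:
--         while end_res >= start_res:
--             yield end_res
--             end_res //= mul
--     else:
--         while start_res <= end_res:
--             yield start_res
--             start_res = start_res * mul
-- ===== SOURCE B (Python) =====
-- def iterate_resolutions(start_res, end_res, mul=2, reverse=False):
--     # Closed-form: count the number of terms once (largest i with mul**i <= end_res // start_res),
--     # then yield each term by index: start_res * mul**i forward, end_res // mul**i in reverse.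
--     if start_res > end_res:
--         return
--     q = end_res // start_res
--     n, p = 0, 1
--     while p <= q:
--         n += 1
--         p *= mul
--     if reverse:
--         for i in range(n):
--             yield end_res // mul ** i
--     else:
--         for i in range(n):
--             yield start_res * mul ** i
-- ===== Notes on version B (the rewrite author's own statement) =====
-- stated objective: alternative
-- what changed: Instead of mutating a running value, B computes the term count once (largest power of mul not exceeding end_res // start_res) and then produces each term by index with a closed-form power, using the identity that repeated floor division equals division by the compound power.
-- outside the precondition, e.g. on iterate_resolutions(1, 7, -2, True): A returns [7], B returns [7, -4, 1, -1]; on iterate_resolutions(-1, 10, -2, False): A returns [-1, 2, -4, 8, -16], B returns []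
import Mathlib
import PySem

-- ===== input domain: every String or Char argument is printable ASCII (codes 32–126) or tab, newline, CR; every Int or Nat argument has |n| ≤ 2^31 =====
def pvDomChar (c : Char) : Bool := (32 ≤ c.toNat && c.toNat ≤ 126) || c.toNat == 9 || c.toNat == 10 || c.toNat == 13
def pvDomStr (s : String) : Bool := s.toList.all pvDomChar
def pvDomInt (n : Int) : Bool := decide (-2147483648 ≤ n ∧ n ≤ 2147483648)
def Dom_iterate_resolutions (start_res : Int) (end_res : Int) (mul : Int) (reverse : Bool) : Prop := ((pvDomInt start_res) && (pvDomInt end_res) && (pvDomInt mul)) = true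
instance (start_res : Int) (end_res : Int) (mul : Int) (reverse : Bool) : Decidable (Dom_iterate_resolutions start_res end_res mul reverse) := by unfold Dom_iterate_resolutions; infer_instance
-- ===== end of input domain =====

-- B computes the term count once via the largest power of mul below end_res // start_res, then
-- produces each term by index with a closed-form power (alternative decomposition, same cost).


-- ===== PORT A =====
-- the forward 'while start_res <= end_res' loop; fuel only makes the recursion total
-- (inside Pre_ and Dom at most 34 iterations can occur, so fuel 100 is never exhausted there)
def pvFwdA (fuel : Nat) (start_res end_res mul : Int) : List Int :=
  match fuel with
  | 0 => []
  | f+1 => if start_res ≤ end_res then start_res :: pvFwdA f (start_res * mul) end_res mul else []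

-- the reverse 'while end_res >= start_res' loop ('end_res //= mul'); fuel as above
def pvRevA (fuel : Nat) (start_res end_res mul : Int) : List Int :=
  match fuel with
  | 0 => []
  | f+1 => if start_res ≤ end_res then end_res :: pvRevA f start_res (PySem.Int.floordiv end_res mul) mul else []

def iterate_resolutions (start_res : Int) (end_res : Int) (mul : Int) (reverse : Bool) : List Int :=
  if reverse then pvRevA 100 start_res end_res mul else pvFwdA 100 start_res end_res mul

-- ===== PORT B =====
-- Source B's 'while p <= q: n += 1; p *= mul' counting loop; fuel only makes the recursion total
def pvCountB (fuel : Nat) (p q mul : Int) (n : Nat) : Nat :=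
  match fuel with
  | 0 => n
  | f+1 => if p ≤ q then pvCountB f (p * mul) q mul (n+1) else n

def iterate_resolutions_alt (start_res : Int) (end_res : Int) (mul : Int) (reverse : Bool) : List Int :=
  if start_res > end_res then []
  else
    let q := PySem.Int.floordiv end_res start_res
    let n := pvCountB 100 1 q mul 0
    if reverse then (List.range n).map (fun i => PySem.Int.floordiv end_res (mul ^ i))
    else (List.range n).map (fun i => start_res * mul ^ i)

-- ===== PRECONDITION & SPEC =====
-- Pre_ restricts to the natural domain of the function (a growth factor mul ≥ 2 and a positive
-- start, or the trivially empty case end_res < start_res): outside it A either never returns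
-- (infinite loop for mul ≤ 1 or start_res ≤ 0, ZeroDivisionError for mul = 0 in reverse) or, for
-- sign-oscillating mul ≤ -2, happens to terminate with values no caller would specify.
def Pre_iterate_resolutions (start_res : Int) (end_res : Int) (mul : Int) (reverse : Bool) : Prop :=
  end_res < start_res ∨ (2 ≤ mul ∧ 1 ≤ start_res)
instance (start_res : Int) (end_res : Int) (mul : Int) (reverse : Bool) : Decidable (Pre_iterate_resolutions start_res end_res mul reverse) := by unfold Pre_iterate_resolutions; infer_instance

def pvWitness_iterate_resolutions : Int × Int × Int × Bool := (4, 64, 2, false)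

def Spec_iterate_resolutions (start_res : Int) (end_res : Int) (mul : Int) (reverse : Bool) (out : List Int) : Prop := out = iterate_resolutions_alt start_res end_res mul reverse
instance (start_res : Int) (end_res : Int) (mul : Int) (reverse : Bool) (out : List Int) : Decidable (Spec_iterate_resolutions start_res end_res mul reverse out) := by unfold Spec_iterate_resolutions; infer_instance

-- ===== CLAIM (what is proved, stated in full; the proofs are below) =====
def Claim_equal_iterate_resolutions : Prop := ∀ (start_res : Int) (end_res : Int) (mul : Int) (reverse : Bool), Dom_iterate_resolutions start_res end_res mul reverse → Pre_iterate_resolutions start_res end_res mul reverse → Spec_iterate_resolutions start_res end_res mul reverse (iterate_resolutions start_res end_res mul reverse)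

-- ===== LEMMAS AND PROOFS =====

theorem pvFwdA_empty (f : Nat) (s e m : Int) (h : e < s) : pvFwdA (f+1) s e m = [] := by
  simp only [pvFwdA, if_neg (by omega : ¬ s ≤ e)]

theorem pvRevA_empty (f : Nat) (s e m : Int) (h : e < s) : pvRevA (f+1) s e m = [] := by
  simp only [pvRevA, if_neg (by omega : ¬ s ≤ e)]

-- the loop condition bridge: s * m^k ≤ e ↔ m^k ≤ e // s (for 0 < s), and s ≤ e // p ↔ s * p ≤ e
theorem pv_bridge (s e p : Int) (hs : 0 < s) (hp : 0 < p) :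
    (s * p ≤ e ↔ p ≤ PySem.Int.floordiv e s) ∧ (s ≤ PySem.Int.floordiv e p ↔ s * p ≤ e) := by
  constructor
  · rw [PySem.Int.le_floordiv_iff_mul_le hs]; constructor <;> intro h <;> linarith [h]
  · rw [PySem.Int.le_floordiv_iff_mul_le hp]

theorem pv_count_eq (q m : Int) (n : Nat) (hm : 2 ≤ m) (hn : q < m ^ n)
    (hmin : ∀ i, i < n → m ^ i ≤ q) :
    ∀ f k, k ≤ n → n ≤ k + f → pvCountB f (m ^ k) q m k = n := by
  intro f
  induction f with
  | zero => intro k h1 h2; simp [pvCountB]; omega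
  | succ f ih =>
    intro k h1 h2
    simp only [pvCountB]
    by_cases hk : m ^ k ≤ q
    · have hkn : k < n := by
        by_contra hcon
        have : m ^ n ≤ m ^ k := pow_le_pow_right₀ (by omega) (by omega)
        omega
      rw [if_pos hk, ← pow_succ]
      exact ih (k+1) (by omega) (by omega)
    · have : n ≤ k := by
        by_contra hcon
        exact hk (hmin k (by omega))
      rw [if_neg hk]; omega

theorem pv_fwd_eq (s e m q : Int) (n : Nat) (hm : 2 ≤ m) (hs : 0 < s)
    (hq : q = PySem.Int.floordiv e s) (hn : q < m ^ n) (hmin : ∀ i, i < n → m ^ i ≤ q) :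
    ∀ f k, n ≤ k + f →
      pvFwdA f (s * m ^ k) e m = (List.range (n - k)).map (fun i => s * m ^ (k + i)) := by
  intro f
  induction f with
  | zero =>
    intro k h2
    have : n - k = 0 := by omega
    simp [pvFwdA, this]
  | succ f ih =>
    intro k h2
    simp only [pvFwdA]
    have hpk : (0:Int) < m ^ k := pow_pos (by omega) k
    have hcond : s * m ^ k ≤ e ↔ m ^ k ≤ q := by
      rw [hq]; exact (pv_bridge s e (m ^ k) hs hpk).1
    by_cases hk : k < n
    · have hle : s * m ^ k ≤ e := hcond.2 (hmin k hk)
      rw [if_pos hle]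
      have harg : s * m ^ k * m = s * m ^ (k+1) := by rw [pow_succ]; ring
      rw [harg, ih (k+1) (by omega)]
      have hrange : n - k = (n - (k+1)) + 1 := by omega
      rw [hrange, List.range_succ_eq_map, List.map_cons, List.map_map]
      simp only [add_zero]
      congr 1
      apply List.map_congr_left
      intro i _
      simp only [Function.comp]
      congr 2
      omega
    · have hge : ¬ s * m ^ k ≤ e := by
        rw [hcond]
        intro hc
        have : m ^ n ≤ m ^ k := pow_le_pow_right₀ (by omega) (by omega)
        omega
      rw [if_neg hge]
      have : n - k = 0 := by omega
      simp [this]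

theorem pv_fdiv_fdiv (e m : Int) (k : Nat) (hm : 2 ≤ m) :
    PySem.Int.floordiv (PySem.Int.floordiv e (m ^ k)) m = PySem.Int.floordiv e (m ^ (k+1)) := by
  have h1 : (0:Int) < m ^ k := pow_pos (by omega) k
  have h2 : (0:Int) < m := by omega
  have h3 : (0:Int) < m ^ (k+1) := pow_pos (by omega) (k+1)
  rw [PySem.Int.floordiv_eq_ediv_of_pos h1, PySem.Int.floordiv_eq_ediv_of_pos h2,
      PySem.Int.floordiv_eq_ediv_of_pos h3, Int.ediv_ediv_of_nonneg (le_of_lt h1), ← pow_succ]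

theorem pv_rev_eq (s e m q : Int) (n : Nat) (hm : 2 ≤ m) (hs : 0 < s)
    (hq : q = PySem.Int.floordiv e s) (hn : q < m ^ n) (hmin : ∀ i, i < n → m ^ i ≤ q) :
    ∀ f k, n ≤ k + f →
      pvRevA f s (PySem.Int.floordiv e (m ^ k)) m
        = (List.range (n - k)).map (fun i => PySem.Int.floordiv e (m ^ (k + i))) := by
  intro f
  induction f with
  | zero =>
    intro k h2
    have : n - k = 0 := by omega
    simp [pvRevA, this]
  | succ f ih =>
    intro k h2
    simp only [pvRevA]
    have hpk : (0:Int) < m ^ k := pow_pos (by omega) k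
    have hcond : s ≤ PySem.Int.floordiv e (m ^ k) ↔ m ^ k ≤ q := by
      rw [(pv_bridge s e (m ^ k) hs hpk).2, hq]
      exact (pv_bridge s e (m ^ k) hs hpk).1
    by_cases hk : k < n
    · have hle : s ≤ PySem.Int.floordiv e (m ^ k) := hcond.2 (hmin k hk)
      rw [if_pos hle, pv_fdiv_fdiv e m k hm, ih (k+1) (by omega)]
      have hrange : n - k = (n - (k+1)) + 1 := by omega
      rw [hrange, List.range_succ_eq_map, List.map_cons, List.map_map]
      simp only [add_zero]
      congr 1
      apply List.map_congr_left
      intro i _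
      simp only [Function.comp]
      congr 2
      omega
    · have hge : ¬ s ≤ PySem.Int.floordiv e (m ^ k) := by
        rw [hcond]
        intro hc
        have : m ^ n ≤ m ^ k := pow_le_pow_right₀ (by omega) (by omega)
        omega
      rw [if_neg hge]
      have : n - k = 0 := by omega
      simp [this]

-- ===== VERDICT (by name: the statement is the Claim_ definition above) =====
theorem iterate_resolutions_spec : Claim_equal_iterate_resolutions := by
  intro s e m rev hdom hpre
  unfold Spec_iterate_resolutions iterate_resolutions iterate_resolutions_alt
  by_cases hse : e < s
  · have hf : pvFwdA 100 s e m = [] := pvFwdA_empty 99 s e m hse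
    have hr : pvRevA 100 s e m = [] := pvRevA_empty 99 s e m hse
    cases rev <;> simp [hf, hr, hse]
  · obtain ⟨hm, hs⟩ : 2 ≤ m ∧ 1 ≤ s := by
      rcases hpre with h | h
      · omega
      · exact h
    have hsle : s ≤ e := by omega
    have hepos : (0:Int) ≤ e := by omega
    set q := PySem.Int.floordiv e s with hq
    have hqe : q ≤ e := by
      rw [hq, PySem.Int.floordiv_eq_ediv_of_pos (by omega : (0:Int) < s)]
      exact Int.ediv_le_self s hepos
    have hqbound : q < m ^ 33 := by
      have h1 : (2:Int) ^ 33 ≤ m ^ 33 := pow_le_pow_left₀ (by norm_num) hm 33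
      have h2 : e ≤ 2147483648 := by
        unfold Dom_iterate_resolutions pvDomInt at hdom
        simp only [Bool.and_eq_true, decide_eq_true_eq] at hdom
        omega
      have h3 : (2147483648:Int) < 2 ^ 33 := by norm_num
      omega
    have hex : ∃ k, q < m ^ k := ⟨33, hqbound⟩
    set n := Nat.find hex with hndef
    have hn : q < m ^ n := Nat.find_spec hex
    have hmin : ∀ i, i < n → m ^ i ≤ q := by
      intro i hi
      have := Nat.find_min hex hi
      omega
    have hn33 : n ≤ 33 := Nat.find_le hqbound
    have hcount : pvCountB 100 1 q m 0 = n := by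
      have := pv_count_eq q m n hm hn hmin 100 0 (by omega) (by omega)
      simpa using this
    have hnotgt : ¬ s > e := by omega
    rw [if_neg hnotgt]
    simp only [hcount]
    cases rev
    · simp only [Bool.false_eq_true, if_false]
      have := pv_fwd_eq s e m q n hm (by omega) hq hn hmin 100 0 (by omega)
      simpa using this
    · simp only [if_true]
      have := pv_rev_eq s e m q n hm (by omega) hq hn hmin 100 0 (by omega)
      simpa using this
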